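-- pv_equiv track=rewrite | github.com/pjj11005/Coding_Test | Programmers/codingtest/week7/84021.py | rotate_check
-- ===== SOURCE A (Python) =====
-- def rotate_check(n, b, p):
--     # 빈칸 좌표들 좌상단에 맞춤
--     min_x = min([i[0] for i in b])
--     min_y = min([i[1] for i in b])
--     b = [(x - min_x, y - min_y) for x, y in b]
--     b.sort()
--
--     # 빈칸 좌표들 좌상단에 맞춤
--     min_x = min([i[0] for i in p])
--     min_y = min([i[1] for i in p])
--     p = [(x - min_x, y - min_y) for x, y in p]
--     p.sort()
--
--     if b == p: # 회전 안시켜도 같을 때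
--         return len(b)
--
--     for i in range(3): # 회전 3번
--         rotated = []
--         # 90도 회전된 좌표 계산
--         for x, y in p:
--             new_x = y
--             new_y = n - 1 - x
--             rotated.append((new_x, new_y))
--
--         min_x = min([coord[0] for coord in rotated])
--         min_y = min([coord[1] for coord in rotated])
--         p = [(x - min_x, y - min_y) for x, y in rotated]
--         p.sort()
--
--         if b == p:
--             return len(b)
--
--     return 0
-- ===== SOURCE B (Python) =====
-- def _normalize(coords):
--     mx = min(c[0] for c in coords)
--     my = min(c[1] for c in coords)
--     return sorted((x - mx, y - my) for x, y in coords)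
--
--
-- def _canon(coords):
--     forms = []
--     cur = coords
--     for _ in range(4):
--         forms.append(_normalize(cur))
--         cur = [(y, -x) for x, y in cur]
--     return min(forms)
--
--
-- def rotate_check(n, b, p):
--     return len(b) if _canon(b) == _canon(p) else 0
-- ===== Notes on version B (the rewrite author's own statement) =====
-- stated objective: alternative
-- what changed: Replaces A's stateful rotate-renormalize-compare loop with early returns by a canonical-form comparison: each list is reduced to the lexicographically smallest of its four n-independent rotations' normal forms, and the two canonical forms are compared once; the board size n drops out of the computation entirely.
import Mathlib
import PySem

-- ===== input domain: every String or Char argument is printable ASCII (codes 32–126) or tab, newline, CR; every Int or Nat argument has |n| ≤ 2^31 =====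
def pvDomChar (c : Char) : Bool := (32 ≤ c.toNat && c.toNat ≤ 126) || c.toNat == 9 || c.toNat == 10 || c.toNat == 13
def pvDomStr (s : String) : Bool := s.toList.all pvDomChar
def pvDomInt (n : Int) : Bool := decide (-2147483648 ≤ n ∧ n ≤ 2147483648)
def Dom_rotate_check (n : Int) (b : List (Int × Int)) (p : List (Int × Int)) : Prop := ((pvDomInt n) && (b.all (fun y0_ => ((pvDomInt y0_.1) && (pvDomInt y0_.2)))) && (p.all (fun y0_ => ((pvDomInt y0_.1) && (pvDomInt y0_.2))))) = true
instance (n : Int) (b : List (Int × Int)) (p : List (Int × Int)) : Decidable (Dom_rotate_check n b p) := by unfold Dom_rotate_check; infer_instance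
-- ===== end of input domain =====

-- B replaces A's stateful rotate-renormalize loop by comparing canonical forms (the lexicographically
-- least normalized rotation, n-independent); objective: alternative decomposition, equal cost.

-- ===== PORT A =====
-- the 'for i in range(3)' loop: state is the current normalized p; early return on match
def rotate_check_loop (n : Int) (b2 : List (Int × Int)) (p2 : List (Int × Int)) : Nat → Int
  | 0 => 0
  | Nat.succ k =>
    let rotated := p2.foldl (fun acc z => acc ++ [(z.2, n - 1 - z.1)]) []
    let min_x := ((PySem.List.min? (rotated.map (fun c => c.1)) (fun v => v)).getD 0)
    let min_y := ((PySem.List.min? (rotated.map (fun c => c.2)) (fun v => v)).getD 0)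
    let p3 := PySem.List.sorted (rotated.map (fun z => (z.1 - min_x, z.2 - min_y))) (fun z => toLex z) false
    if b2 = p3 then (b2.length : Int) else rotate_check_loop n b2 p3 k

def rotate_check (n : Int) (b : List (Int × Int)) (p : List (Int × Int)) : Int :=
  let min_x := ((PySem.List.min? (b.map (fun i => i.1)) (fun v => v)).getD 0)
  let min_y := ((PySem.List.min? (b.map (fun i => i.2)) (fun v => v)).getD 0)
  let b2 := PySem.List.sorted (b.map (fun z => (z.1 - min_x, z.2 - min_y))) (fun z => toLex z) false
  let min_x2 := ((PySem.List.min? (p.map (fun i => i.1)) (fun v => v)).getD 0)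
  let min_y2 := ((PySem.List.min? (p.map (fun i => i.2)) (fun v => v)).getD 0)
  let p2 := PySem.List.sorted (p.map (fun z => (z.1 - min_x2, z.2 - min_y2))) (fun z => toLex z) false
  if b2 = p2 then (b2.length : Int)
  else rotate_check_loop n b2 p2 3

-- ===== PORT B =====
def pvNormalize (coords : List (Int × Int)) : List (Int × Int) :=
  let mx := ((PySem.List.min? (coords.map (fun c => c.1)) (fun v => v)).getD 0)
  let my := ((PySem.List.min? (coords.map (fun c => c.2)) (fun v => v)).getD 0)
  PySem.List.sorted (coords.map (fun z => (z.1 - mx, z.2 - my))) (fun z => toLex z) false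

-- Python's '<' on lists of int pairs (lexicographic); exact via the Lex order on lists of Lex pairs
def pvListLt (x y : List (Int × Int)) : Bool :=
  decide (x.map (fun z => toLex z) < y.map (fun z => toLex z))

def pvCanon (coords : List (Int × Int)) : List (Int × Int) :=
  let st := (List.range 4).foldl
    (fun (st : List (List (Int × Int)) × List (Int × Int)) _ =>
      (st.1 ++ [pvNormalize st.2], st.2.map (fun z => (z.2, -z.1)))) ([], coords)
  match st.1 with
  | [] => []
  | h :: t => t.foldl (fun best x => if pvListLt x best then x else best) h

def rotate_check_alt (n : Int) (b : List (Int × Int)) (p : List (Int × Int)) : Int :=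
  if pvCanon b = pvCanon p then (b.length : Int) else 0

-- ===== PRECONDITION & SPEC =====
-- Pre_ excludes empty b or p, on which both A and B raise ValueError (min() of an empty sequence).
def Pre_rotate_check (n : Int) (b : List (Int × Int)) (p : List (Int × Int)) : Prop :=
  b ≠ [] ∧ p ≠ []
instance (n : Int) (b : List (Int × Int)) (p : List (Int × Int)) : Decidable (Pre_rotate_check n b p) := by
  unfold Pre_rotate_check; infer_instance

def pvWitness_rotate_check : Int × (List (Int × Int)) × (List (Int × Int)) :=
  (2, [(0, 0), (0, 1)], [(1, 0), (1, 1)])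

def Spec_rotate_check (n : Int) (b : List (Int × Int)) (p : List (Int × Int)) (out : Int) : Prop := out = rotate_check_alt n b p
instance (n : Int) (b : List (Int × Int)) (p : List (Int × Int)) (out : Int) : Decidable (Spec_rotate_check n b p out) := by unfold Spec_rotate_check; infer_instance

-- ===== CLAIM (what is proved, stated in full; the proofs are below) =====
def Claim_equal_rotate_check : Prop := ∀ (n : Int) (b : List (Int × Int)) (p : List (Int × Int)), Dom_rotate_check n b p → Pre_rotate_check n b p → Spec_rotate_check n b p (rotate_check n b p)

-- ===== LEMMAS AND PROOFS =====

def pvMinI (l : List Int) : Int := ((PySem.List.min? l (fun v => v)).getD 0)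

def pvR (s : List (Int × Int)) : List (Int × Int) := s.map (fun z => (z.2, -z.1))
def pvRit : Nat → List (Int × Int) → List (Int × Int)
  | 0, s => s
  | Nat.succ k, s => pvR (pvRit k s)
def pvQ (k : Nat) (s : List (Int × Int)) : List (Int × Int) := pvNormalize (pvRit k s)

def pvE (s : List (Int × Int)) : List (Int ×ₗ Int) := s.map (fun z => toLex z)

lemma pvMinI_spec (l : List Int) (h : l ≠ []) : pvMinI l ∈ l ∧ ∀ y ∈ l, pvMinI l ≤ y := by
  unfold pvMinI
  cases hm : PySem.List.min? l (fun v => v) with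
  | none => exact absurd (((PySem.List.min?_eq_none_iff l (fun v => v)).mp hm)) h
  | some m =>
    simp only [Option.getD_some]
    exact ⟨PySem.List.min?_mem hm, PySem.List.min?_isMin hm⟩

lemma pvMinI_perm {l l' : List Int} (h : l.Perm l') (hne : l ≠ []) : pvMinI l = pvMinI l' := by
  have hne2 : l' ≠ [] := fun hh => hne (List.Perm.eq_nil (hh ▸ h))
  obtain ⟨hm, hmin⟩ := pvMinI_spec l hne
  obtain ⟨hm', hmin'⟩ := pvMinI_spec l' hne2
  exact le_antisymm (hmin _ (h.symm.mem_iff.mp hm')) (hmin' _ (h.mem_iff.mp hm))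

lemma pvMinI_shift (l : List Int) (c : Int) (h : l ≠ []) :
    pvMinI (l.map (fun v => v + c)) = pvMinI l + c := by
  have hne : l.map (fun v => v + c) ≠ [] := by simpa using h
  obtain ⟨hm, hmin⟩ := pvMinI_spec _ hne
  obtain ⟨hm', hmin'⟩ := pvMinI_spec l h
  simp only [List.mem_map] at hm
  obtain ⟨a, ha, hae⟩ := hm
  have h1 : pvMinI (l.map (fun v => v + c)) ≤ pvMinI l + c :=
    hmin _ (List.mem_map.mpr ⟨_, hm', rfl⟩)
  have h2 : pvMinI l + c ≤ pvMinI (l.map (fun v => v + c)) := by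
    have := hmin' a ha; omega
  omega

lemma pvNormalize_eq (s : List (Int × Int)) :
    pvNormalize s = PySem.List.sorted (s.map (fun z => (z.1 - pvMinI (s.map (fun c => c.1)), z.2 - pvMinI (s.map (fun c => c.2))))) (fun z => toLex z) false := rfl

lemma pvToLex_inj : Function.Injective (fun z : Int × Int => toLex z) := fun _ _ h => h

lemma pvNormalize_perm {s t : List (Int × Int)} (h : s.Perm t) : pvNormalize s = pvNormalize t := by
  rcases eq_or_ne s [] with rfl | hs
  · rw [h.symm.eq_nil]
  · have hms1 := pvMinI_perm (h.map (fun c : Int × Int => c.1)) (by simpa using hs)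
    have hms2 := pvMinI_perm (h.map (fun c : Int × Int => c.2)) (by simpa using hs)
    rw [pvNormalize_eq, pvNormalize_eq, hms1, hms2]
    exact PySem.List.sorted_eq_sorted_of_perm _ _ _ pvToLex_inj (h.map _)

lemma pvNormalize_shift (s : List (Int × Int)) (c1 c2 : Int) (h : s ≠ []) :
    pvNormalize (s.map (fun z => (z.1 + c1, z.2 + c2))) = pvNormalize s := by
  have h1 : (s.map (fun z : Int × Int => (z.1 + c1, z.2 + c2))).map (fun c => c.1)
      = (s.map (fun c => c.1)).map (fun v => v + c1) := by
    simp [List.map_map]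
  have h2 : (s.map (fun z : Int × Int => (z.1 + c1, z.2 + c2))).map (fun c => c.2)
      = (s.map (fun c => c.2)).map (fun v => v + c2) := by
    simp [List.map_map]
  rw [pvNormalize_eq, pvNormalize_eq s, h1, h2,
    pvMinI_shift _ _ (by simpa using h), pvMinI_shift _ _ (by simpa using h)]
  congr 1
  rw [List.map_map]
  apply List.map_congr_left
  intro z _
  simp only [Function.comp_apply, Prod.mk.injEq]
  constructor <;> ring

lemma pvNormalize_perm_self (s : List (Int × Int)) :
    (pvNormalize s).Perm (s.map (fun z => (z.1 - pvMinI (s.map (fun c => c.1)), z.2 - pvMinI (s.map (fun c => c.2))))) := by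
  rw [pvNormalize_eq]; exact PySem.List.sorted_perm _ _ _

lemma pvNormalize_ne_nil {s : List (Int × Int)} (h : s ≠ []) : pvNormalize s ≠ [] := by
  rw [pvNormalize_eq]
  intro hc
  exact h (by simpa using (PySem.List.sorted_eq_nil_iff _ _ _).mp hc)

lemma pvSub_shift (s : List (Int × Int)) (c1 c2 : Int) (h : s ≠ []) :
    pvNormalize (s.map (fun z => (z.1 - c1, z.2 - c2))) = pvNormalize s := by
  have : (s.map (fun z : Int × Int => (z.1 - c1, z.2 - c2)))
      = s.map (fun z : Int × Int => (z.1 + (-c1), z.2 + (-c2))) := by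
    apply List.map_congr_left; intro z _; simp [sub_eq_add_neg]
  rw [this, pvNormalize_shift s _ _ h]

lemma pvNormalize_idem (s : List (Int × Int)) (h : s ≠ []) :
    pvNormalize (pvNormalize s) = pvNormalize s := by
  rw [pvNormalize_perm (pvNormalize_perm_self s), pvSub_shift s _ _ h]

lemma pvR_map_shift (s : List (Int × Int)) (c1 c2 : Int) :
    pvR (s.map (fun z => (z.1 - c1, z.2 - c2)))
      = (pvR s).map (fun z => (z.1 - c2, z.2 - (-c1))) := by
  simp only [pvR, List.map_map]
  apply List.map_congr_left; intro z _
  simp only [Function.comp_apply, Prod.mk.injEq]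
  simp
  omega

lemma pvCongr_NR {s t : List (Int × Int)} (hs : s ≠ []) (ht : t ≠ [])
    (h : pvNormalize s = pvNormalize t) : pvNormalize (pvR s) = pvNormalize (pvR t) := by
  have hperm : (s.map (fun z => (z.1 - pvMinI (s.map (fun c => c.1)), z.2 - pvMinI (s.map (fun c => c.2))))).Perm
      (t.map (fun z => (z.1 - pvMinI (t.map (fun c => c.1)), z.2 - pvMinI (t.map (fun c => c.2))))) :=
    ((pvNormalize_perm_self s).symm.trans (h ▸ pvNormalize_perm_self t))
  have hperm2 : (pvR (s.map (fun z => (z.1 - pvMinI (s.map (fun c => c.1)), z.2 - pvMinI (s.map (fun c => c.2)))))).Perm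
      (pvR (t.map (fun z => (z.1 - pvMinI (t.map (fun c => c.1)), z.2 - pvMinI (t.map (fun c => c.2)))))) :=
    hperm.map (fun z : Int × Int => (z.2, -z.1))
  have h2 := pvNormalize_perm hperm2
  rw [pvR_map_shift, pvR_map_shift] at h2
  rwa [pvSub_shift (pvR s) _ _ (by simp [pvR, hs]), pvSub_shift (pvR t) _ _ (by simp [pvR, ht])] at h2

lemma pvRit_ne_nil {s : List (Int × Int)} (h : s ≠ []) (k : Nat) : pvRit k s ≠ [] := by
  induction k with
  | zero => exact h
  | succ k ih => simpa [pvRit, pvR] using ih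

lemma pvR_four (s : List (Int × Int)) : pvR (pvR (pvR (pvR s))) = s := by
  simp [pvR, List.map_map, Function.comp_def]

lemma pvRit_period (k : Nat) (s : List (Int × Int)) : pvRit (k + 4) s = pvRit k s := by
  induction k with
  | zero => exact pvR_four s
  | succ k ih => show pvR (pvRit (k+4) s) = pvR (pvRit k s); rw [ih]

lemma pvStep (n : Int) (s : List (Int × Int)) (h : s ≠ []) (k : Nat) :
    pvNormalize ((pvQ k s).map (fun z => (z.2, n - 1 - z.1))) = pvQ (k + 1) s := by
  have h1 : (pvQ k s).map (fun z : Int × Int => (z.2, n - 1 - z.1))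
      = (pvR (pvQ k s)).map (fun z : Int × Int => (z.1 - 0, z.2 - (1 - n))) := by
    simp only [pvR, List.map_map]
    apply List.map_congr_left; intro z _
    simp only [Function.comp_apply, Prod.mk.injEq]
    constructor <;> ring
  have hq : pvQ k s ≠ [] := pvNormalize_ne_nil (pvRit_ne_nil h k)
  rw [h1, pvSub_shift _ _ _ (by simp [pvR, hq])]
  have := pvCongr_NR hq (pvRit_ne_nil h k) (pvNormalize_idem (pvRit k s) (pvRit_ne_nil h k))
  exact this

lemma pvClimb {b p : List (Int × Int)} (hb : b ≠ []) (hp : p ≠ []) {i j : Nat}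
    (h : pvQ i b = pvQ j p) (m : Nat) : pvQ (i + m) b = pvQ (j + m) p := by
  induction m with
  | zero => exact h
  | succ m ih =>
    show pvNormalize (pvR (pvRit (i + m) b)) = pvNormalize (pvR (pvRit (j + m) p))
    exact pvCongr_NR (pvRit_ne_nil hb _) (pvRit_ne_nil hp _) ih

lemma pvQ_period (k : Nat) (s : List (Int × Int)) : pvQ (k + 4) s = pvQ k s := by
  unfold pvQ; rw [pvRit_period]

lemma pvQ_period' (k : Nat) (s : List (Int × Int)) {m : Nat} (hm : m = k + 4) : pvQ m s = pvQ k s := by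
  rw [hm, pvQ_period]

lemma pvLen_normalize (s : List (Int × Int)) : (pvNormalize s).length = s.length := by
  rw [pvNormalize_eq, PySem.List.length_sorted, List.length_map]

lemma pvE_inj : Function.Injective pvE :=
  fun _ _ h => List.map_injective_iff.mpr (fun _ _ hh => hh) h

lemma pvMin4_mem {α : Type} [LinearOrder α] (a b c d : α) :
    min (min (min a b) c) d = a ∨ min (min (min a b) c) d = b ∨
    min (min (min a b) c) d = c ∨ min (min (min a b) c) d = d := by
  rcases min_choice (min (min a b) c) d with h3 | h3
  · rw [h3]
    rcases min_choice (min a b) c with h2 | h2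
    · rw [h2]; rcases min_choice a b with h1 | h1 <;> simp [h1]
    · simp [h2]
  · simp [h3]

lemma pvLoop_step (n : Int) (b2 p : List (Int × Int)) (hp : p ≠ []) (k m : Nat) :
    rotate_check_loop n b2 (pvQ k p) (m + 1)
      = if b2 = pvQ (k + 1) p then (b2.length : Int) else rotate_check_loop n b2 (pvQ (k + 1) p) m := by
  have hrot : (pvQ k p).foldl (fun acc z => acc ++ [(z.2, n - 1 - z.1)]) ([] : List (Int × Int))
      = (pvQ k p).map (fun z => (z.2, n - 1 - z.1)) := by
    simpa using PySem.List.foldl_append_singleton_eq_map (fun z : Int × Int => (z.2, n - 1 - z.1)) (pvQ k p) []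
  calc rotate_check_loop n b2 (pvQ k p) (m + 1)
      = if b2 = pvNormalize ((pvQ k p).map (fun z => (z.2, n - 1 - z.1))) then (b2.length : Int)
        else rotate_check_loop n b2 (pvNormalize ((pvQ k p).map (fun z => (z.2, n - 1 - z.1)))) m := by
        simp only [rotate_check_loop]; rw [hrot]; rfl
    _ = _ := by rw [pvStep n p hp k]

lemma pvQ0_eq (s : List (Int × Int)) : pvQ 0 s = pvNormalize s := rfl

lemma pvA_char (n : Int) (b p : List (Int × Int)) (hb : b ≠ []) (hp : p ≠ []) :
    rotate_check n b p =
      if pvQ 0 b = pvQ 0 p ∨ pvQ 0 b = pvQ 1 p ∨ pvQ 0 b = pvQ 2 p ∨ pvQ 0 b = pvQ 3 p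
      then (b.length : Int) else 0 := by
  have hlen : ((pvQ 0 b).length : Int) = (b.length : Int) := by
    rw [pvQ0_eq, pvLen_normalize]
  have h0 : rotate_check n b p
      = if pvQ 0 b = pvQ 0 p then ((pvQ 0 b).length : Int)
        else rotate_check_loop n (pvQ 0 b) (pvQ 0 p) 3 := rfl
  rw [h0]
  by_cases e0 : pvQ 0 b = pvQ 0 p
  · rw [if_pos e0, if_pos (Or.inl e0), hlen]
  · rw [if_neg e0, pvLoop_step n _ p hp 0 2]
    by_cases e1 : pvQ 0 b = pvQ 1 p
    · rw [if_pos e1, if_pos (Or.inr (Or.inl e1)), hlen]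
    · rw [if_neg e1, pvLoop_step n _ p hp 1 1]
      by_cases e2 : pvQ 0 b = pvQ 2 p
      · rw [if_pos e2, if_pos (Or.inr (Or.inr (Or.inl e2))), hlen]
      · rw [if_neg e2, pvLoop_step n _ p hp 2 0]
        by_cases e3 : pvQ 0 b = pvQ 3 p
        · rw [if_pos e3, if_pos (Or.inr (Or.inr (Or.inr e3))), hlen]
        · rw [if_neg e3, if_neg (by tauto)]
          rfl

-- B-side characterization

lemma pvE_m (best x : List (Int × Int)) :
    pvE (if pvListLt x best then x else best) = min (pvE best) (pvE x) := by
  by_cases h : pvE x < pvE best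
  · rw [if_pos (show pvListLt x best = true by simpa [pvListLt, pvE] using h), min_eq_right h.le]
  · rw [if_neg (by simpa [pvListLt, pvE] using h), min_eq_left (not_lt.mp h)]

lemma pvCanon_eq (s : List (Int × Int)) :
    pvE (pvCanon s) = min (min (min (pvE (pvQ 0 s)) (pvE (pvQ 1 s))) (pvE (pvQ 2 s))) (pvE (pvQ 3 s)) := by
  have hc : pvCanon s =
      (fun best x => if pvListLt x best then x else best)
        ((fun best x => if pvListLt x best then x else best)
          ((fun best x => if pvListLt x best then x else best) (pvQ 0 s) (pvQ 1 s)) (pvQ 2 s)) (pvQ 3 s) := rfl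
  rw [hc]
  simp only []
  rw [pvE_m, pvE_m, pvE_m]

lemma pvMain_fwd {b p : List (Int × Int)} (hb : b ≠ []) (hp : p ≠ [])
    (h : pvQ 0 b = pvQ 0 p ∨ pvQ 0 b = pvQ 1 p ∨ pvQ 0 b = pvQ 2 p ∨ pvQ 0 b = pvQ 3 p) :
    pvCanon b = pvCanon p := by
  apply pvE_inj
  rw [pvCanon_eq, pvCanon_eq]
  rcases h with h | h | h | h
  · have h1 := pvClimb hb hp h 1
    have h2 := pvClimb hb hp h 2
    have h3 := pvClimb hb hp h 3
    rw [h, h1, h2, h3]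
  · have h1 := pvClimb hb hp h 1
    have h2 := pvClimb hb hp h 2
    have h3 : pvQ 3 b = pvQ 0 p := (pvClimb hb hp h 3).trans (pvQ_period' 0 p rfl)
    rw [h, h1, h2, h3]; ac_rfl
  · have h1 := pvClimb hb hp h 1
    have h2 : pvQ 2 b = pvQ 0 p := (pvClimb hb hp h 2).trans (pvQ_period' 0 p rfl)
    have h3 : pvQ 3 b = pvQ 1 p := (pvClimb hb hp h 3).trans (pvQ_period' 1 p rfl)
    rw [h, h1, h2, h3]; ac_rfl
  · have h1 : pvQ 1 b = pvQ 0 p := (pvClimb hb hp h 1).trans (pvQ_period' 0 p rfl)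
    have h2 : pvQ 2 b = pvQ 1 p := (pvClimb hb hp h 2).trans (pvQ_period' 1 p rfl)
    have h3 : pvQ 3 b = pvQ 2 p := (pvClimb hb hp h 3).trans (pvQ_period' 2 p rfl)
    rw [h, h1, h2, h3]; ac_rfl

lemma pvShift_back {b p : List (Int × Int)} (hb : b ≠ []) (hp : p ≠ []) {i j : Nat}
    (hi : i < 4) (hj : j < 4) (h : pvQ i b = pvQ j p) :
    pvQ 0 b = pvQ 0 p ∨ pvQ 0 b = pvQ 1 p ∨ pvQ 0 b = pvQ 2 p ∨ pvQ 0 b = pvQ 3 p := by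
  have h4 := pvClimb hb hp h (4 - i)
  rw [show i + (4 - i) = 0 + 4 by omega] at h4
  rw [pvQ_period] at h4
  have ht : j + (4 - i) < 8 := by omega
  have ht1 : 1 ≤ j + (4 - i) := by omega
  set t := j + (4 - i) with hteq
  clear_value t
  interval_cases t
  · tauto
  · tauto
  · tauto
  · rw [pvQ_period' 0 p rfl] at h4; tauto
  · rw [pvQ_period' 1 p rfl] at h4; tauto
  · rw [pvQ_period' 2 p rfl] at h4; tauto
  · rw [pvQ_period' 3 p rfl] at h4; tauto

lemma pvMain (b p : List (Int × Int)) (hb : b ≠ []) (hp : p ≠ []) :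
    (pvQ 0 b = pvQ 0 p ∨ pvQ 0 b = pvQ 1 p ∨ pvQ 0 b = pvQ 2 p ∨ pvQ 0 b = pvQ 3 p)
    ↔ pvCanon b = pvCanon p := by
  constructor
  · exact pvMain_fwd hb hp
  · intro hc
    have he : pvE (pvCanon b) = pvE (pvCanon p) := by rw [hc]
    rw [pvCanon_eq, pvCanon_eq] at he
    have hmb := pvMin4_mem (pvE (pvQ 0 b)) (pvE (pvQ 1 b)) (pvE (pvQ 2 b)) (pvE (pvQ 3 b))
    have hmp := pvMin4_mem (pvE (pvQ 0 p)) (pvE (pvQ 1 p)) (pvE (pvQ 2 p)) (pvE (pvQ 3 p))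
    rcases hmb with hB | hB | hB | hB <;> rcases hmp with hP | hP | hP | hP <;>
      exact pvShift_back hb hp (by omega) (by omega) (pvE_inj ((hB.symm.trans he).trans hP))

-- ===== VERDICT (by name: the statement is the Claim_ definition above) =====
theorem rotate_check_spec : Claim_equal_rotate_check := by
  intro n b p _hd hpre
  obtain ⟨hb, hp⟩ := hpre
  unfold Spec_rotate_check rotate_check_alt
  rw [pvA_char n b p hb hp]
  by_cases h : pvQ 0 b = pvQ 0 p ∨ pvQ 0 b = pvQ 1 p ∨ pvQ 0 b = pvQ 2 p ∨ pvQ 0 b = pvQ 3 p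
  · rw [if_pos h, if_pos ((pvMain b p hb hp).mp h)]
  · rw [if_neg h, if_neg (fun hc => h ((pvMain b p hb hp).mpr hc))]
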